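-- pv_equiv track=rewrite | github.com/23f2003614/firmable-pipeline | crawlers/c21_cgap.py | _derive_commodity_group
-- ===== SOURCE A (Python) =====
-- _POTATO_KW = ["potato", "pomme de terre", "patate"]
--
-- _FRUIT_KW = [
--     "apple", "peach", "pear", "plum", "cherry", "nectarine", "apricot",
--     "blueberr", "strawberr", "raspberry", "berry", "grape", "prune",
--     "pomme", "cerise", "abricot", "peche", "bleuet", "fraise",
--     "framboise", "raisin", "blackberr", "haskap", "rhubarb",
--     "sweet cherr", "currant", "gooseberr", "mure", "groseille",
-- ]
--
-- _VEG_KW = [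
--     "carrot", "onion", "tomato", "pepper", "cucumber", "broccoli",
--     "cauliflower", "corn", "bean", "squash", "spinach", "lettuce",
--     "asparagus", "garlic", "choy", "bok", "gai lan", "leek", "celery",
--     "beet", "rutabaga", "parsnip", "turnip", "radish", "pumpkin",
--     "gourd", "zucchini", "brussels", "kale", "dill", "cilantro",
--     "fenugreek", "sweet potato", "yam", "sweet corn", "vegetable",
--     # French
--     "ail", "oignon", "chou", "laitue", "celeri", "navet", "radis",
--     "citrouille", "poivron", "concombre", "pois", "epinard", "poireau",
--     "legume", "haricot", "mais", "carotte",
-- ]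
--
-- def _derive_commodity_group(scope: str) -> str:
--     if not scope:
--         return "Unknown"
--     s = scope.lower()
--     if "greenhouse" in s or "serre" in s:
--         return "Greenhouse"
--     hp = any(k in s for k in _POTATO_KW)
--     hf = any(k in s for k in _FRUIT_KW)
--     hv = any(k in s for k in _VEG_KW)
--     if hp and not hf and not hv:
--         return "Potatoes"
--     if hf and not hv and not hp:
--         return "Fruits"
--     if hv and not hf and not hp:
--         return "Vegetables"
--     if hf or hv or hp:
--         return "Mixed"
--     if any(k in s for k in [
--         "fruit", "legume", "fresh produce", "wholesale", "repacking",
--         "brokerage", "commerce", "fruits et legumes",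
--     ]):
--         return "Mixed"
--     return "Other"
-- ===== SOURCE B (Python) =====
-- _POTATO_KW = ["potato", "pomme de terre", "patate"]
--
-- _FRUIT_KW = [
--     "apple", "peach", "pear", "plum", "cherry", "nectarine", "apricot",
--     "blueberr", "strawberr", "raspberry", "berry", "grape", "prune",
--     "pomme", "cerise", "abricot", "peche", "bleuet", "fraise",
--     "framboise", "raisin", "blackberr", "haskap", "rhubarb",
--     "sweet cherr", "currant", "gooseberr", "mure", "groseille",
-- ]
--
-- _VEG_KW = [
--     "carrot", "onion", "tomato", "pepper", "cucumber", "broccoli",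
--     "cauliflower", "corn", "bean", "squash", "spinach", "lettuce",
--     "asparagus", "garlic", "choy", "bok", "gai lan", "leek", "celery",
--     "beet", "rutabaga", "parsnip", "turnip", "radish", "pumpkin",
--     "gourd", "zucchini", "brussels", "kale", "dill", "cilantro",
--     "fenugreek", "sweet potato", "yam", "sweet corn", "vegetable",
--     "ail", "oignon", "chou", "laitue", "celeri", "navet", "radis",
--     "citrouille", "poivron", "concombre", "pois", "epinard", "poireau",
--     "legume", "haricot", "mais", "carotte",
-- ]
--
-- # one flat keyword -> group table, greenhouse keywords included
-- _KW2GROUP = (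
--     [("greenhouse", "Greenhouse"), ("serre", "Greenhouse")]
--     + [(k, "Potatoes") for k in _POTATO_KW]
--     + [(k, "Fruits") for k in _FRUIT_KW]
--     + [(k, "Vegetables") for k in _VEG_KW]
-- )
--
-- _FALLBACK_KW = [
--     "fruit", "legume", "fresh produce", "wholesale", "repacking",
--     "brokerage", "commerce", "fruits et legumes",
-- ]
--
-- def _derive_commodity_group(scope: str) -> str:
--     if not scope:
--         return "Unknown"
--     s = scope.lower()
--     hits = set()
--     for kw, grp in _KW2GROUP:
--         if kw in s:
--             hits.add(grp)
--     if "Greenhouse" in hits: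
--         return "Greenhouse"
--     if len(hits) > 1:
--         return "Mixed"
--     if hits:
--         return min(hits)  # the single matched crop group
--     if any(k in s for k in _FALLBACK_KW):
--         return "Mixed"
--     return "Other"
-- ===== Notes on version B (the rewrite author's own statement) =====
-- stated objective: simpler
-- what changed: Replaces A's greenhouse pre-guard plus three independent per-group any-scans and hand-written four-branch exclusivity ladder with one flat pass over a single keyword->group table (greenhouse keywords included) that accumulates matched group names in a set, deciding from that set: Greenhouse if present, Mixed if more than one crop group, the single group if one, else the fallback scan.
import Mathlib
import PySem

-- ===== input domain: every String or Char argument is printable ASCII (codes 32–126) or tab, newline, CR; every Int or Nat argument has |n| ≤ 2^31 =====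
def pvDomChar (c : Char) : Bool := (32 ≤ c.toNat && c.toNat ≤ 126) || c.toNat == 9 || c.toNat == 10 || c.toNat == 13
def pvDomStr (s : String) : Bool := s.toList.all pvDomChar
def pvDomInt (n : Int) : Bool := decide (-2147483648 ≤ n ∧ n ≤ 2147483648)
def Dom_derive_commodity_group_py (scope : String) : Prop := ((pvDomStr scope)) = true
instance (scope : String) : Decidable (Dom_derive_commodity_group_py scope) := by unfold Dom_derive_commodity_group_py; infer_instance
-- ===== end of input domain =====

-- B replaces A's greenhouse pre-guard, three per-group any-scans and boolean branch ladder
-- by one flat pass over a single keyword->group table accumulating matched groups in a set,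
-- then a decision on that set (objective: simpler).

-- ===== PORT A =====
def pvPotatoKw : List String := ["potato", "pomme de terre", "patate"]

def pvFruitKw : List String :=
  ["apple", "peach", "pear", "plum", "cherry", "nectarine", "apricot",
   "blueberr", "strawberr", "raspberry", "berry", "grape", "prune",
   "pomme", "cerise", "abricot", "peche", "bleuet", "fraise",
   "framboise", "raisin", "blackberr", "haskap", "rhubarb",
   "sweet cherr", "currant", "gooseberr", "mure", "groseille"]

def pvVegKw : List String :=
  ["carrot", "onion", "tomato", "pepper", "cucumber", "broccoli",
   "cauliflower", "corn", "bean", "squash", "spinach", "lettuce",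
   "asparagus", "garlic", "choy", "bok", "gai lan", "leek", "celery",
   "beet", "rutabaga", "parsnip", "turnip", "radish", "pumpkin",
   "gourd", "zucchini", "brussels", "kale", "dill", "cilantro",
   "fenugreek", "sweet potato", "yam", "sweet corn", "vegetable",
   "ail", "oignon", "chou", "laitue", "celeri", "navet", "radis",
   "citrouille", "poivron", "concombre", "pois", "epinard", "poireau",
   "legume", "haricot", "mais", "carotte"]

def pvFallbackKw : List String :=
  ["fruit", "legume", "fresh produce", "wholesale", "repacking",
   "brokerage", "commerce", "fruits et legumes"]

-- tail of A after the empty guard and lowering (a named helper; same steps as the Python)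
def pvTailA (s : String) : String :=
  if PySem.Str.isIn "greenhouse" s || PySem.Str.isIn "serre" s then "Greenhouse"
  else
      let hp := pvPotatoKw.any (fun k => PySem.Str.isIn k s)
      let hf := pvFruitKw.any (fun k => PySem.Str.isIn k s)
      let hv := pvVegKw.any (fun k => PySem.Str.isIn k s)
      if hp && !hf && !hv then "Potatoes"
      else if hf && !hv && !hp then "Fruits"
      else if hv && !hf && !hp then "Vegetables"
      else if hf || hv || hp then "Mixed"
      else if pvFallbackKw.any (fun k => PySem.Str.isIn k s) then "Mixed"
      else "Other"

def derive_commodity_group_py (scope : String) : String :=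
  if scope = "" then "Unknown" else pvTailA (PySem.Str.lower scope)

-- ===== PORT B =====
-- one flat keyword -> group table, greenhouse keywords included
def pvKw2Group : List (String × String) :=
  [("greenhouse", "Greenhouse"), ("serre", "Greenhouse")]
  ++ pvPotatoKw.map (fun k => (k, "Potatoes"))
  ++ pvFruitKw.map (fun k => (k, "Fruits"))
  ++ pvVegKw.map (fun k => (k, "Vegetables"))

-- the set of matched group names (the 'hits' loop of Source B)
def pvHits (s : String) : PySem.Set String :=
  pvKw2Group.foldl
    (fun st p => if PySem.Str.isIn p.1 s then PySem.Set.add st p.2 else st)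
    PySem.Set.empty

-- tail of B after the empty guard and lowering
def pvTailB (s : String) : String :=
  let hits := pvHits s
  if PySem.Set.contains hits "Greenhouse" then "Greenhouse"
  else if 1 < hits.length then "Mixed"
  else if hits ≠ [] then (PySem.List.min? hits (fun x => x)).getD ""   -- min of a singleton set; hits ≠ [] here
  else if pvFallbackKw.any (fun k => PySem.Str.isIn k s) then "Mixed"
  else "Other"

def derive_commodity_group_py_alt (scope : String) : String :=
  if scope = "" then "Unknown" else pvTailB (PySem.Str.lower scope)

-- ===== PRECONDITION & SPEC =====
def Spec_derive_commodity_group_py (scope : String) (out : String) : Prop := out = derive_commodity_group_py_alt scope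
instance (scope : String) (out : String) : Decidable (Spec_derive_commodity_group_py scope out) := by unfold Spec_derive_commodity_group_py; infer_instance

-- ===== CLAIM (what is proved, stated in full; the proofs are below) =====
def Claim_equal_derive_commodity_group_py : Prop := ∀ (scope : String), Dom_derive_commodity_group_py scope → Spec_derive_commodity_group_py scope (derive_commodity_group_py scope)

-- ===== LEMMAS AND PROOFS =====

-- proof-only abbreviation: a conditional add
def pvAddIf (b : Bool) (st : PySem.Set String) (g : String) : PySem.Set String :=
  if b then PySem.Set.add st g else st

-- folding the hits loop over a one-group segment of the table = one conditional add
theorem pvSeg_fold (s g : String) (kws : List String) (st : PySem.Set String) :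
    (kws.map (fun k => (k, g))).foldl
      (fun st p => if PySem.Str.isIn p.1 s then PySem.Set.add st p.2 else st) st
    = pvAddIf (kws.any (fun k => PySem.Str.isIn k s)) st g := by
  induction kws generalizing st with
  | nil => simp [pvAddIf]
  | cons k t ih =>
    simp only [List.map_cons, List.foldl_cons, List.any_cons]
    rw [ih]
    cases h : PySem.Str.isIn k s <;>
      cases h2 : (t.any fun k => PySem.Str.isIn k s) <;>
        simp [pvAddIf, PySem.Set.add, PySem.Set.contains] <;>
          (by_cases hm : g ∈ st <;> simp [hm])

-- the hits set, as four conditional adds in table order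
theorem pvHits_eq (s : String) :
    pvHits s =
      pvAddIf (pvVegKw.any (fun k => PySem.Str.isIn k s))
        (pvAddIf (pvFruitKw.any (fun k => PySem.Str.isIn k s))
          (pvAddIf (pvPotatoKw.any (fun k => PySem.Str.isIn k s))
            (pvAddIf (PySem.Str.isIn "greenhouse" s || PySem.Str.isIn "serre" s)
              PySem.Set.empty "Greenhouse")
            "Potatoes")
          "Fruits")
        "Vegetables" := by
  unfold pvHits pvKw2Group
  rw [List.foldl_append, List.foldl_append, List.foldl_append]
  rw [pvSeg_fold, pvSeg_fold, pvSeg_fold]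
  simp only [List.foldl_cons, List.foldl_nil]
  cases h0 : PySem.Str.isIn "greenhouse" s <;>
    cases h1 : PySem.Str.isIn "serre" s <;> rfl

theorem pvTail_eq (s : String) : pvTailA s = pvTailB s := by
  unfold pvTailA pvTailB
  rw [pvHits_eq]
  cases h0 : PySem.Str.isIn "greenhouse" s <;>
    cases h1 : PySem.Str.isIn "serre" s <;>
      cases hp : pvPotatoKw.any (fun k => PySem.Str.isIn k s) <;>
        cases hf : pvFruitKw.any (fun k => PySem.Str.isIn k s) <;>
          cases hv : pvVegKw.any (fun k => PySem.Str.isIn k s) <;>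
            cases hfb : pvFallbackKw.any (fun k => PySem.Str.isIn k s) <;> rfl

-- ===== VERDICT (by name: the statement is the Claim_ definition above) =====
theorem derive_commodity_group_py_spec : Claim_equal_derive_commodity_group_py := by
  intro scope _
  unfold Spec_derive_commodity_group_py derive_commodity_group_py derive_commodity_group_py_alt
  by_cases he : scope = "" <;> simp [he, pvTail_eq]
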